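-- pv_equiv track=rewrite | github.com/JacobHanimann/IsoAligner | IsoAligner_core/Visualise_Alignment.py | compute_AA_number_for_positions
-- ===== SOURCE A (Python) =====
-- def compute_AA_number_for_positions(sequence_list):
--     AA_numbers = []
--     counter = 0
--     for index, element in enumerate(sequence_list):
--         if index==0 and element!="-":
--             counter +=1
--         if index % 10==0:
--             if index==0:
--                 if not element =="-":
--                     AA_numbers.append(counter)
--                 else:
--                     AA_numbers.append(0)
--             else:
--                 AA_numbers.append(counter)
--         if element != "-" and index != 0:
--             counter += 1
--     #return Visualise_Alignment.clean_up_AA_numbers(AA_numbers)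
--     return (AA_numbers)
-- ===== SOURCE B (Python) =====
-- from itertools import accumulate
--
-- def compute_AA_number_for_positions(sequence_list):
--     prefix = list(accumulate(0 if e == "-" else 1 for e in sequence_list))
--     return [prefix[i] if i == 0 else prefix[i - 1]
--             for i in range(0, len(sequence_list), 10)]
-- ===== Notes on version B (the rewrite author's own statement) =====
-- stated objective: simpler
-- what changed: Replaced A's single stateful enumerate loop (running counter with special-cased index 0 and in-loop sampling) by a prefix-sum table of non-gap counts built with itertools.accumulate plus a separate comprehension over range(0, len, 10) that just indexes the table.
import Mathlib
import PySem

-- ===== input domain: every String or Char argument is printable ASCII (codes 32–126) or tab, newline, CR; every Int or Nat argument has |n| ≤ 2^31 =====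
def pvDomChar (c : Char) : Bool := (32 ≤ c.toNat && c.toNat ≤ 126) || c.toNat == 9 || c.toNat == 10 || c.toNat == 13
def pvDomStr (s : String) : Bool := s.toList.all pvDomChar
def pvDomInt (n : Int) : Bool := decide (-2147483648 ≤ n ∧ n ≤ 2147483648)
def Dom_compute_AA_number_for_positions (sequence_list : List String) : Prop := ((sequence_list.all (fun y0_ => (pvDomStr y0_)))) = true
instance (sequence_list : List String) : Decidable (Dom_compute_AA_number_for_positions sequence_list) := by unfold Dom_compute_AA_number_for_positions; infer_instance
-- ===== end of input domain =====

-- B replaces A's single stateful counter loop by a prefix-sum table plus a separate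
-- step-10 sampling pass (objective: simpler).

-- ===== PORT A =====
-- loop body of A's for-loop: state is (AA_numbers, counter), one enumerate item per step
def pvStepA (st : List Int × Int) (ie : Int × String) : List Int × Int :=
  let counter0 : Int := if ie.1 == 0 && ie.2 != "-" then st.2 + 1 else st.2
  let aa : List Int :=
    if PySem.Int.mod ie.1 10 == 0 then
      if ie.1 == 0 then
        if !(ie.2 == "-") then st.1 ++ [counter0] else st.1 ++ [(0 : Int)]
      else st.1 ++ [counter0]
    else st.1
  let counter1 : Int := if ie.2 != "-" && ie.1 != 0 then counter0 + 1 else counter0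
  (aa, counter1)

def compute_AA_number_for_positions (sequence_list : List String) : List Int :=
  ((PySem.List.enumerate sequence_list).foldl pvStepA ([], 0)).1

-- ===== PORT B =====
-- itertools.accumulate of the 0/1 gap indicators, transliterated as a running-sum fold
def pvAccum (xs : List Int) : List Int :=
  (xs.foldl (fun (st : List Int × Int) v => (st.1 ++ [st.2 + v], st.2 + v)) ([], 0)).1

def compute_AA_number_for_positions_alt (sequence_list : List String) : List Int :=
  let pre := pvAccum (sequence_list.map (fun e => if e == "-" then (0 : Int) else 1))
  -- Source B's prefix[i] / prefix[i-1] ('pre' here: 'prefix' is a Lean keyword): the sampled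
  -- indices are always in range, so pyGetD is exact
  (PySem.List.pyRange 0 (sequence_list.length : Int) 10).map
    (fun i => if i == 0 then PySem.List.pyGetD pre i 0 else PySem.List.pyGetD pre (i - 1) 0)

-- ===== PRECONDITION & SPEC =====
def Spec_compute_AA_number_for_positions (sequence_list : List String) (out : List Int) : Prop := out = compute_AA_number_for_positions_alt sequence_list
instance (sequence_list : List String) (out : List Int) : Decidable (Spec_compute_AA_number_for_positions sequence_list out) := by unfold Spec_compute_AA_number_for_positions; infer_instance

-- ===== CLAIM (what is proved, stated in full; the proofs are below) =====
def Claim_equal_compute_AA_number_for_positions : Prop := ∀ (sequence_list : List String), Dom_compute_AA_number_for_positions sequence_list → Spec_compute_AA_number_for_positions sequence_list (compute_AA_number_for_positions sequence_list)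

-- ===== LEMMAS AND PROOFS =====

-- 0/1 indicator and running non-gap count
def pvF (e : String) : Int := if e == "-" then 0 else 1

def pvG (xs : List String) : Int := (xs.map pvF).sum

-- what A's loop emits from index s onwards with running counter c
def pvSpecA : List String → Int → Int → List Int
  | [], _, _ => []
  | x :: xs, s, c =>
      (if PySem.Int.mod s 10 == 0 then [c] else []) ++ pvSpecA xs (s + 1) (c + pvF x)

lemma pvG_cons (x : String) (xs : List String) : pvG (x :: xs) = pvF x + pvG xs := by
  simp [pvG]

lemma pvFoldA (xs : List String) : ∀ (s : Int), 1 ≤ s → ∀ (acc : List Int) (c : Int),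
    (PySem.List.enumerate xs s).foldl pvStepA (acc, c) = (acc ++ pvSpecA xs s c, c + pvG xs) := by
  induction xs with
  | nil => intro s hs acc c; simp [PySem.List.enumerate_nil, pvSpecA, pvG]
  | cons x xs ih =>
      intro s hs acc c
      rw [PySem.List.enumerate_cons]
      have hs0 : (s == 0) = false := by simp; omega
      have hs0' : (s != 0) = true := by simp; omega
      simp only [List.foldl_cons]
      rw [ih (s + 1) (by omega)]
      simp only [pvStepA, hs0, hs0', Bool.false_and, Bool.and_true, pvSpecA,
        pvG_cons, pvF, Bool.false_eq_true, if_false, Prod.mk.injEq]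
      refine ⟨?_, ?_⟩
      · split_ifs <;> simp_all [List.append_assoc]
      · split_ifs with h1 h2 <;> simp_all <;> ring

-- A on a nonempty list: head sample, then the tail loop starting at index 1
lemma pvA_cons (x : String) (xs : List String) :
    compute_AA_number_for_positions (x :: xs) = pvF x :: pvSpecA xs 1 (pvF x) := by
  unfold compute_AA_number_for_positions
  rw [PySem.List.enumerate_cons, List.foldl_cons]
  have h : pvStepA ([], 0) (0, x) = ([pvF x], pvF x) := by
    simp only [pvStepA, pvF]
    split_ifs <;> simp_all [PySem.Int.mod]
  rw [h]
  have h1 : (0:Int) + 1 = 1 := by norm_num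
  rw [h1, pvFoldA xs 1 (by omega)]
  simp

-- the emitted samples are exactly the multiples of 10 in [s, s+len), valued by prefix counts
lemma pvSpecA_eq (xs : List String) : ∀ (s c : Int),
    pvSpecA xs s c =
      ((PySem.List.pyRange s (s + (xs.length : Int)) 1).filter
          (fun i => PySem.Int.mod i 10 == 0)).map
        (fun i => c + pvG (xs.take (i - s).toNat)) := by
  induction xs with
  | nil => intro s c; simp [pvSpecA]
  | cons x xs ih =>
      intro s c
      have hlt : s < s + ((x :: xs).length : Int) := by simp
      rw [PySem.List.pyRange_one_cons hlt]
      have harr : s + ((x :: xs).length : Int) = (s + 1) + (xs.length : Int) := by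
        simp only [List.length_cons]
        push_cast
        ring
      rw [harr, List.filter_cons]
      have htail :
          ((PySem.List.pyRange (s + 1) ((s + 1) + (xs.length : Int)) 1).filter
              (fun i => PySem.Int.mod i 10 == 0)).map
            (fun i => c + pvG ((x :: xs).take (i - s).toNat)) =
          ((PySem.List.pyRange (s + 1) ((s + 1) + (xs.length : Int)) 1).filter
              (fun i => PySem.Int.mod i 10 == 0)).map
            (fun i => (c + pvF x) + pvG (xs.take (i - (s + 1)).toNat)) := by
        apply List.map_congr_left
        intro i hi
        have hmem := (List.mem_filter.mp hi).1
        have hsi : s + 1 ≤ i := (PySem.List.mem_pyRange_one.mp hmem).1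
        have htn : (i - s).toNat = (i - (s + 1)).toNat + 1 := by omega
        rw [htn, List.take_succ_cons, pvG_cons]
        ring
      unfold pvSpecA
      rw [ih (s + 1) (c + pvF x), ← htail]
      split_ifs with hm
      · simp [pvG]
      · simp

-- step-10 range = filtered step-1 range
lemma pvRange10 (n : Int) :
    PySem.List.pyRange 0 n 10 =
      (PySem.List.pyRange 0 n 1).filter (fun i => PySem.Int.mod i 10 == 0) := by
  have h1 : (PySem.List.pyRange 0 n 10).Pairwise (· < ·) := by
    rw [PySem.List.pyRange_of_pos 0 n (by omega : (0:Int) < 10)]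
    refine List.Pairwise.map _ ?_ (List.pairwise_lt_range)
    intro a b hab; omega
  have h2 : ((PySem.List.pyRange 0 n 1).filter (fun i => PySem.Int.mod i 10 == 0)).Pairwise (· < ·) :=
    List.Pairwise.filter _ (PySem.List.pairwise_lt_pyRange_one 0 n)
  have hmem : ∀ (a : Int), a ∈ PySem.List.pyRange 0 n 10 ↔
      a ∈ (PySem.List.pyRange 0 n 1).filter (fun i => PySem.Int.mod i 10 == 0) := by
    intro a
    rw [PySem.List.mem_pyRange_iff_of_pos (by omega : (0:Int) < 10), List.mem_filter,
      PySem.List.mem_pyRange_one]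
    have : (PySem.Int.mod a 10 == 0) = true ↔ (10:Int) ∣ a := by
      simpa using (PySem.Int.mod_eq_zero_iff_dvd a 10)
    constructor
    · rintro ⟨h0, hn, hd⟩; exact ⟨⟨h0, hn⟩, this.mpr (by simpa using hd)⟩
    · rintro ⟨⟨h0, hn⟩, hd⟩; exact ⟨h0, hn, by simpa using this.mp hd⟩
  exact List.eq_of_perm_of_sorted (fun a b _ _ h h' => le_antisymm h h') (h1.imp le_of_lt) (h2.imp le_of_lt)
    ((List.perm_ext_iff_of_nodup (h1.nodup) (h2.nodup)).mpr hmem)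

-- running sums of the fold: structural form
def pvPartial : Int → List Int → List Int
  | _, [] => []
  | t, v :: vs => (t + v) :: pvPartial (t + v) vs

lemma pvAccum_fold (vs : List Int) : ∀ (acc : List Int) (t : Int),
    vs.foldl (fun (st : List Int × Int) v => (st.1 ++ [st.2 + v], st.2 + v)) (acc, t) =
      (acc ++ pvPartial t vs, t + vs.sum) := by
  induction vs with
  | nil => intro acc t; simp [pvPartial]
  | cons v vs ih =>
      intro acc t
      simp only [List.foldl_cons, ih, pvPartial, List.sum_cons, Prod.mk.injEq]
      refine ⟨by simp, by ring⟩

lemma pvAccum_eq (vs : List Int) : pvAccum vs = pvPartial 0 vs := by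
  unfold pvAccum
  rw [pvAccum_fold]
  simp

lemma pvPartial_getD (vs : List Int) : ∀ (t : Int) (k : Nat), k < vs.length →
    (pvPartial t vs).getD k 0 = t + (vs.take (k + 1)).sum := by
  induction vs with
  | nil => intro t k h; simp at h
  | cons v vs ih =>
      intro t k h
      cases k with
      | zero => simp [pvPartial]
      | succ k =>
          simp only [pvPartial, List.getD_cons_succ, List.take_succ_cons, List.sum_cons]
          rw [ih (t + v) k (by simpa using h)]
          ring

lemma pvPartial_get (vs : List Int) (t i : Int) (h0 : 0 ≤ i) (_ : i < (vs.length : Int)) :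
    PySem.List.pyGetD (pvPartial t vs) i 0 = t + (vs.take (i.toNat + 1)).sum := by
  rw [PySem.List.pyGetD_of_nonneg _ _ h0, pvPartial_getD vs t i.toNat (by omega)]

-- ===== VERDICT (by name: the statement is the Claim_ definition above) =====
theorem compute_AA_number_for_positions_spec : Claim_equal_compute_AA_number_for_positions := by
  intro sl _
  unfold Spec_compute_AA_number_for_positions
  cases sl with
  | nil => decide
  | cons x xs =>
      rw [pvA_cons, pvSpecA_eq]
      unfold compute_AA_number_for_positions_alt
      rw [pvAccum_eq, pvRange10]
      have hn : (0:Int) < (((x :: xs).length : Nat) : Int) := by simp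
      rw [PySem.List.pyRange_one_cons hn, List.filter_cons]
      have hm0 : (PySem.Int.mod 0 10 == 0) = true := by decide
      rw [if_pos hm0, List.map_cons, if_pos (by simp)]
      set vals := (x :: xs).map (fun e => if e == "-" then (0 : Int) else 1) with hvals
      have hvlen : (vals.length : Int) = (xs.length : Int) + 1 := by simp [hvals]
      have hhead : PySem.List.pyGetD (pvPartial 0 vals) 0 0 = pvF x := by
        rw [pvPartial_get vals 0 0 (by omega) (by omega)]
        simp [hvals, pvF]
      rw [hhead]
      congr 1
      · -- tails: map over the same filtered range
        have harr : (1:Int) + (xs.length : Int) = (((x :: xs).length : Nat) : Int) := by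
          simp; ring
        rw [harr]
        apply List.map_congr_left
        intro i hi
        have hmem := (List.mem_filter.mp hi).1
        have hri := PySem.List.mem_pyRange_one.mp hmem
        have h1i : 1 ≤ i := hri.1
        have hin : i < (((x :: xs).length : Nat) : Int) := hri.2
        have hiz : (i == 0) = false := by simp; omega
        rw [if_neg (by simp at hiz ⊢; omega)]
        rw [pvPartial_get vals 0 (i - 1) (by omega) (by omega)]
        have htk : (i - 1).toNat + 1 = i.toNat := by omega
        rw [htk]
        have hsum : (vals.take i.toNat).sum = pvF x + pvG (xs.take (i - 1).toNat) := by
          have hit : i.toNat = (i - 1).toNat + 1 := by omega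
          rw [hvals, hit]
          simp only [List.map_cons, List.take_succ_cons, List.sum_cons, pvG,
            List.map_take]
          rfl
        rw [hsum]
        ring
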